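-- pv_equiv track=rewrite | github.com/suryapratapsingh8/codechef-python-programs | THREEAPFREE.py | is_ap_free
-- ===== SOURCE A (Python) =====
-- def is_ap_free(seq):
--     # Check if the sequence is AP-free
--     n = len(seq)
--     for i in range(n):
--         for j in range(i+1, n):
--             for k in range(j+1, n):
--                 if seq[j] - seq[i] == seq[k] - seq[j]:
--                     return False
--     return True
-- ===== SOURCE B (Python) =====
-- def is_ap_free(seq):
--     # For each middle element y = seq[j], test whether some later element z
--     # has its AP-completing partner 2*y - z among the earlier elements (a set).
--     left = set()
--     for j, y in enumerate(seq):
--         if any(2 * y - z in left for z in seq[j + 1:]):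
--             return False
--         left.add(y)
--     return True
-- ===== Notes on version B (the rewrite author's own statement) =====
-- stated objective: alternative
-- what changed: Replaced the triple nested index loop with a single left-to-right pass that keeps a set of already-seen elements and, for each middle element, scans only the suffix testing whether 2*mid - right is in that set.
import Mathlib
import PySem

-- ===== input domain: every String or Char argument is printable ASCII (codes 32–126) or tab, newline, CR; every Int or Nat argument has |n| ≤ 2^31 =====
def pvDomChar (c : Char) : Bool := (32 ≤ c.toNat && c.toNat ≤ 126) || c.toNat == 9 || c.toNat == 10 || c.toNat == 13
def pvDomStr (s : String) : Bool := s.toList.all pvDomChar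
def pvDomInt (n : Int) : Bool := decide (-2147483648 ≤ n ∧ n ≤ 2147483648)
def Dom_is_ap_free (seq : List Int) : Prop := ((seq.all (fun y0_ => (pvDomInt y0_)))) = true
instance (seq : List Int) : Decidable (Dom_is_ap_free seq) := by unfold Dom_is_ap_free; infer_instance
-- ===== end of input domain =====

-- B replaces A's triple nested index loop by one left-to-right pass that keeps a
-- set of earlier elements and tests 2*mid - right against it (objective: alternative).

-- ===== PORT A =====
def is_ap_free (seq : List Int) : Bool :=
  let n : Int := seq.length
  !((PySem.List.pyRange 0 n 1).any fun i =>
    (PySem.List.pyRange (i + 1) n 1).any fun j =>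
      (PySem.List.pyRange (j + 1) n 1).any fun k =>
        PySem.List.pyGetD seq j 0 - PySem.List.pyGetD seq i 0
          == PySem.List.pyGetD seq k 0 - PySem.List.pyGetD seq j 0)

-- ===== PORT B =====
-- the loop of Source B: y is the current middle element, `left` the set of elements
-- already passed, `rest` the elements after y (Python's seq[j+1:])
def apFreeLoop (left : PySem.Set Int) : List Int → Bool
  | [] => true
  | y :: rest =>
    if rest.any (fun z => PySem.Set.contains left (2 * y - z)) then false
    else apFreeLoop (PySem.Set.add left y) rest

def is_ap_free_alt (seq : List Int) : Bool := apFreeLoop PySem.Set.empty seq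

-- ===== PRECONDITION & SPEC =====
def Spec_is_ap_free (seq : List Int) (out : Bool) : Prop := out = is_ap_free_alt seq
instance (seq : List Int) (out : Bool) : Decidable (Spec_is_ap_free seq out) := by unfold Spec_is_ap_free; infer_instance

-- ===== CLAIM (what is proved, stated in full; the proofs are below) =====
def Claim_equal_is_ap_free : Prop := ∀ (seq : List Int), Dom_is_ap_free seq → Spec_is_ap_free seq (is_ap_free seq)

-- ===== LEMMAS AND PROOFS =====

-- the common characterisation: a 3-term arithmetic progression by indices
def HasAP (l : List Int) : Prop :=
  ∃ i j k : Nat, i < j ∧ j < k ∧ k < l.length ∧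
    l.getD j 0 - l.getD i 0 = l.getD k 0 - l.getD j 0

lemma triple_any_iff (seq : List Int) :
    ((PySem.List.pyRange 0 (seq.length : Int) 1).any fun i =>
      (PySem.List.pyRange (i + 1) (seq.length : Int) 1).any fun j =>
        (PySem.List.pyRange (j + 1) (seq.length : Int) 1).any fun k =>
          PySem.List.pyGetD seq j 0 - PySem.List.pyGetD seq i 0
            == PySem.List.pyGetD seq k 0 - PySem.List.pyGetD seq j 0) = true ↔ HasAP seq := by
  simp only [List.any_eq_true, PySem.List.mem_pyRange_one, beq_iff_eq, HasAP]
  constructor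
  · rintro ⟨i, ⟨hi0, hin⟩, j, ⟨hji, hjn⟩, k, ⟨hkj, hkn⟩, heq⟩
    refine ⟨i.toNat, j.toNat, k.toNat, by omega, by omega, by omega, ?_⟩
    rw [PySem.List.pyGetD_eq_getElem _ _ (by omega) (by omega),
        PySem.List.pyGetD_eq_getElem _ _ (by omega) (by omega),
        PySem.List.pyGetD_eq_getElem _ _ (by omega) (by omega)] at heq
    rw [List.getD_eq_getElem _ _ (by omega), List.getD_eq_getElem _ _ (by omega),
        List.getD_eq_getElem _ _ (by omega)]
    exact heq
  · rintro ⟨i, j, k, hij, hjk, hk, heq⟩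
    refine ⟨(i : Int), ⟨by omega, by omega⟩, (j : Int), ⟨by omega, by omega⟩,
      (k : Int), ⟨by omega, by omega⟩, ?_⟩
    simpa only [PySem.List.pyGetD_natCast] using heq

lemma is_ap_free_iff (seq : List Int) : is_ap_free seq = true ↔ ¬ HasAP seq := by
  rw [is_ap_free]
  simp only [Bool.not_eq_true', Bool.eq_false_iff, Ne, triple_any_iff]

-- invariant for B's loop: `left` is the set of elements already passed
lemma apFreeLoop_iff (l : List Int) : ∀ (left : PySem.Set Int),
    apFreeLoop left l = true ↔
      ¬ ∃ j k : Nat, j < k ∧ k < l.length ∧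
        ((2 * l.getD j 0 - l.getD k 0) ∈ left ∨
          ∃ i, i < j ∧ l.getD i 0 = 2 * l.getD j 0 - l.getD k 0) := by
  induction l with
  | nil => intro left; simp [apFreeLoop]
  | cons y rest ih =>
    intro left
    simp only [apFreeLoop]
    by_cases h : (rest.any fun z => PySem.Set.contains left (2 * y - z)) = true
    · rw [if_pos h]
      have hex : ∃ j k : Nat, j < k ∧ k < (y :: rest).length ∧
          ((2 * (y :: rest).getD j 0 - (y :: rest).getD k 0) ∈ left ∨
            ∃ i, i < j ∧ (y :: rest).getD i 0 = 2 * (y :: rest).getD j 0 - (y :: rest).getD k 0) := by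
        obtain ⟨z, hz, hcon⟩ := List.any_eq_true.mp h
        obtain ⟨k', hk', hzk⟩ := List.mem_iff_getElem.mp hz
        refine ⟨0, k' + 1, by omega, by simpa using Nat.succ_lt_succ hk', Or.inl ?_⟩
        rw [List.getD_cons_zero, List.getD_cons_succ, List.getD_eq_getElem _ _ hk', hzk]
        exact (PySem.Set.contains_iff left _).mp hcon
      exact iff_of_false (by simp) (not_not_intro hex)
    · rw [if_neg h, ih (PySem.Set.add left y), not_iff_not]
      have hno : ∀ z ∈ rest, (2 * y - z) ∉ left := fun z hz hmem =>
        h (List.any_eq_true.mpr ⟨z, hz, (PySem.Set.contains_iff left _).mpr hmem⟩)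
      constructor
      · rintro ⟨j, k, hjk, hk, hc⟩
        refine ⟨j + 1, k + 1, by omega, by simpa using Nat.succ_lt_succ hk, ?_⟩
        simp only [List.getD_cons_succ]
        rcases hc with hmem | ⟨i, hi, hiv⟩
        · rw [PySem.Set.mem_add] at hmem
          rcases hmem with hl | hy
          · exact Or.inl hl
          · exact Or.inr ⟨0, by omega, by rw [List.getD_cons_zero]; exact hy.symm⟩
        · exact Or.inr ⟨i + 1, by omega, by rw [List.getD_cons_succ]; exact hiv⟩
      · rintro ⟨j, k, hjk, hk, hc⟩
        cases j with
        | zero =>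
          exfalso
          obtain ⟨k', rfl⟩ : ∃ k', k = k' + 1 := ⟨k - 1, by omega⟩
          have hk' : k' < rest.length := by simpa using hk
          rcases hc with hmem | ⟨i, hi, _⟩
          · rw [List.getD_cons_zero, List.getD_cons_succ, List.getD_eq_getElem _ _ hk'] at hmem
            exact hno _ (List.getElem_mem _) hmem
          · omega
        | succ j' =>
          obtain ⟨k', rfl⟩ : ∃ k', k = k' + 1 := ⟨k - 1, by omega⟩
          simp only [List.getD_cons_succ] at hc
          refine ⟨j', k', by omega, by simpa using hk, ?_⟩
          rcases hc with hmem | ⟨i, hi, hiv⟩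
          · exact Or.inl (by rw [PySem.Set.mem_add]; exact Or.inl hmem)
          · cases i with
            | zero =>
              rw [List.getD_cons_zero] at hiv
              exact Or.inl (by rw [PySem.Set.mem_add]; exact Or.inr hiv.symm)
            | succ i' =>
              rw [List.getD_cons_succ] at hiv
              exact Or.inr ⟨i', by omega, hiv⟩

lemma is_ap_free_alt_iff (seq : List Int) : is_ap_free_alt seq = true ↔ ¬ HasAP seq := by
  rw [is_ap_free_alt, apFreeLoop_iff, HasAP, not_iff_not]
  constructor
  · rintro ⟨j, k, hjk, hk, hc⟩
    rcases hc with hmem | ⟨i, hi, hiv⟩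
    · simp [PySem.Set.empty] at hmem
    · exact ⟨i, j, k, hi, hjk, hk, by omega⟩
  · rintro ⟨i, j, k, hij, hjk, hk, heq⟩
    exact ⟨j, k, hjk, hk, Or.inr ⟨i, hij, by omega⟩⟩

-- ===== VERDICT (by name: the statement is the Claim_ definition above) =====
theorem is_ap_free_spec : Claim_equal_is_ap_free := by
  intro seq _
  unfold Spec_is_ap_free
  rw [Bool.eq_iff_iff, is_ap_free_iff, is_ap_free_alt_iff]
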